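-- pv_equiv track=rewrite | github.com/szafnerzs/nhackathon24 | matrix_operations/main.py | compute_expression
-- ===== SOURCE A (Python) =====
-- def compute_expression(expression, matrices, operator):
--     # Evaluate the postfix expression using matrices
--     stack = []
--     # Loop through each token in the expression
--     for char in expression:
--         if char in operator:
--             # Pop two matrices from stack and perform the operation
--             b = stack.pop()
--             a = stack.pop()
--             if char == '+':
--                 # Add matrices element-wise
--                 result = [[a[i][n] + b[i][n] for n in range(len(a[0]))] for i in range(len(a))]
--             elif char == '*':
--                 # Matrix multiplication
--                 result = [[sum(a[i][k] * b[k][n] for k in range(len(a[0]))) for n in range(len(b[0]))] for i in range(len(a))]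
--             stack.append(result)
--         else:
--             # Push matrix onto the stack
--             stack.append(matrices[char])
--     return stack.pop()
-- ===== SOURCE B (Python) =====
-- def compute_expression(expression, matrices, operator):
--     # Recursive-descent evaluation of the postfix expression over its implicit
--     # tree structure, consuming tokens from the right (no explicit value stack).
--     toks = list(expression)
--
--     def helper(pos):
--         # returns (value of the complete subexpression ending at pos, index just before it)
--         t = toks[pos]
--         if t in operator:
--             right, pos2 = helper(pos - 1)
--             left, pos3 = helper(pos2)
--             if t == '+':
--                 val = [[left[i][n] + right[i][n] for n in range(len(left[0]))]
--                        for i in range(len(left))]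
--             elif t == '*':
--                 val = [[sum(left[i][k] * right[k][n] for k in range(len(left[0])))
--                         for n in range(len(right[0]))] for i in range(len(left))]
--             else:
--                 raise ValueError("unsupported operator: " + t)
--             return val, pos3
--         return matrices[t], pos - 1
--
--     value, _ = helper(len(toks) - 1)
--     return value
-- ===== Notes on version B (the rewrite author's own statement) =====
-- stated objective: alternative
-- what changed: Replaces the explicit stack loop over all tokens by a recursive descent from the rightmost token over the expression's implicit tree structure, returning (value, next position) and never materialising a stack.
-- outside the precondition, e.g. on compute_expression('ab+ab-', {'a': [[1]], 'b': [[2]]}, {'+', '-'}): A returns [[3]], B raises ValueError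
import Mathlib
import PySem

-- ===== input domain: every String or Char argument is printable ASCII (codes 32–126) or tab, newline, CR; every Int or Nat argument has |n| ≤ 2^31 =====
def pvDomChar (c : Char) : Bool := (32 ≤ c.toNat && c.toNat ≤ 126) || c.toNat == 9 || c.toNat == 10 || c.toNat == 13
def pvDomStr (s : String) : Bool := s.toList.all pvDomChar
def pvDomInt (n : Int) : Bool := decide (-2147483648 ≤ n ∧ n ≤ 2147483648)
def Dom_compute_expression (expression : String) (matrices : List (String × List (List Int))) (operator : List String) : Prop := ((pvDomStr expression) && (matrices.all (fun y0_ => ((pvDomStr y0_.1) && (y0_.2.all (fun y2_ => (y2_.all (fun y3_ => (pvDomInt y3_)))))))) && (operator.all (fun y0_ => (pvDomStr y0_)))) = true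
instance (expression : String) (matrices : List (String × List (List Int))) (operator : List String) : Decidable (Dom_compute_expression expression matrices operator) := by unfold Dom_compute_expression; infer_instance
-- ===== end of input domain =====

-- B evaluates the postfix expression by recursive descent from the rightmost token
-- (objective: alternative decomposition, no explicit value stack); A keeps a stack loop.
-- Equality of RETURN values is claimed on Pre_ (inputs on which Python A returns normally).

-- ===== PORT A =====
-- element access a[i][n]: in-range under Pre_'s shape condition (Python raises out of range)
def pvElA (m : List (List Int)) (i n : Nat) : Int := (m.getD i []).getD n 0

-- [[a[i][n] + b[i][n] for n in range(len(a[0]))] for i in range(len(a))]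
def pvAddA (a b : List (List Int)) : List (List Int) :=
  (List.range a.length).map (fun i =>
    (List.range (a.headD []).length).map (fun n => pvElA a i n + pvElA b i n))

-- [[sum(a[i][k] * b[k][n] for k in range(len(a[0]))) for n in range(len(b[0]))] for i in range(len(a))]
def pvMulA (a b : List (List Int)) : List (List Int) :=
  (List.range a.length).map (fun i =>
    (List.range (b.headD []).length).map (fun n =>
      ((List.range (a.headD []).length).map (fun k => pvElA a i k * pvElA b k n)).sum))

-- matrices[char]: first-match association-list lookup; default [] stands for KeyError (excluded by Pre_)
def pvLookA (matrices : List (String × List (List Int))) (k : String) : List (List Int) :=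
  ((matrices.find? (fun p => p.1 == k)).map Prod.snd).getD []

-- the if '+' / elif '*' chain; [] stands for Python's NameError/stale-`result` path (excluded by Pre_)
def pvApplyA (c : Char) (a b : List (List Int)) : List (List Int) :=
  if c = '+' then pvAddA a b else if c = '*' then pvMulA a b else []

-- one iteration of A's loop; stack head = Python stack top; [] stands for IndexError on pop (excluded by Pre_)
def pvStepA (matrices : List (String × List (List Int))) (operator : List String)
    (stack : List (List (List Int))) (c : Char) : List (List (List Int)) :=
  if String.mk [c] ∈ operator then
    match stack with
    | b :: a :: s => pvApplyA c a b :: s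
    | _ => []
  else pvLookA matrices (String.mk [c]) :: stack

def compute_expression (expression : String) (matrices : List (String × List (List Int))) (operator : List String) : List (List Int) :=
  (expression.toList.foldl (pvStepA matrices operator) []).headD []

-- ===== PORT B =====
-- Source B's '+' / '*' comprehensions and matrices[t] lookup are literally the same
-- expressions as A's, so port B reuses pvAddA / pvMulA / pvLookA.
-- Source B's helper(pos): recursion from the rightmost token, here over the REVERSED token
-- list (position pos ↔ suffix of the reversed list); fuel = token count is a pure
-- totalization guard; `none` stands for Source B raising (Index/Key/ValueError), excluded by Pre_
def pvEvalB (matrices : List (String × List (List Int))) (operator : List String) :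
    Nat → List Char → Option (List (List Int) × List Char)
  | 0, _ => none
  | _ + 1, [] => none
  | fuel + 1, c :: rest =>
    if String.mk [c] ∈ operator then
      match pvEvalB matrices operator fuel rest with
      | some (r, rest2) =>
        match pvEvalB matrices operator fuel rest2 with
        | some (l, rest3) =>
          if c = '+' then some (pvAddA l r, rest3)
          else if c = '*' then some (pvMulA l r, rest3)
          else none
        | none => none
      | none => none
    else some (pvLookA matrices (String.mk [c]), rest)

def compute_expression_alt (expression : String) (matrices : List (String × List (List Int))) (operator : List String) : List (List Int) :=
  match pvEvalB matrices operator expression.toList.length expression.toList.reverse with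
  | some (v, _) => v
  | none => []

-- ===== PRECONDITION & SPEC =====
-- running stack-depth check (pure counting, like bracket balance): before each operator the
-- depth is ≥ 2 and every operator token is '+' or '*' (otherwise Python A raises or reuses
-- a stale `result`)
def pvOk (operator : List String) : Nat → List Char → Bool
  | _, [] => true
  | k, c :: ts =>
    if String.mk [c] ∈ operator then
      decide (c = '+' ∨ c = '*') && decide (2 ≤ k) && pvOk operator (k - 1) ts
    else pvOk operator (k + 1) ts

-- final stack depth (must be ≥ 1 for the final pop)
def pvCnt (operator : List String) : Nat → List Char → Nat
  | k, [] => k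
  | k, c :: ts =>
    if String.mk [c] ∈ operator then pvCnt operator (k - 1) ts
    else pvCnt operator (k + 1) ts

-- row-length profile check: tracks, token by token, the row lengths of every stack entry and
-- refuses exactly the shapes on which A's comprehensions hit an IndexError (values never used)
def pvShapes (matrices : List (String × List (List Int))) (operator : List String) :
    List Char → List (List Nat) → Bool
  | [], _ => true
  | c :: ts, st =>
    if String.mk [c] ∈ operator then
      match st with
      | pb :: pa :: s =>
        if c = '+' then
          match pa with
          | [] => pvShapes matrices operator ts ([] :: s)
          | p0 :: _ =>
            pa.all (fun li => decide (p0 ≤ li)) &&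
            decide (pa.length ≤ pb.length) &&
            (pb.take pa.length).all (fun li => decide (p0 ≤ li)) &&
            pvShapes matrices operator ts (List.replicate pa.length p0 :: s)
        else if c = '*' then
          match pa with
          | [] => pvShapes matrices operator ts ([] :: s)
          | p0 :: _ =>
            match pb with
            | [] => false
            | q0 :: _ =>
              pa.all (fun li => decide (p0 ≤ li)) &&
              (decide (q0 = 0) || decide (p0 = 0) ||
                (decide (p0 ≤ pb.length) && (pb.take p0).all (fun li => decide (q0 ≤ li)))) &&
              pvShapes matrices operator ts (List.replicate pa.length q0 :: s)
        else false
      | _ => false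
    else
      pvShapes matrices operator ts
        (((matrices.find? (fun p => p.1 == String.mk [c])).map
            (fun p => p.2.map List.length)).getD [] :: st)

-- Pre_ = the inputs on which Python A returns normally, minus two accidental corners: tokens in
-- `operator` other than '+'/'*' (A can return a stale `result` there) and duplicate keys in
-- `matrices` (which value the dict keeps is an artefact of the assoc-list representation).
def Pre_compute_expression (expression : String) (matrices : List (String × List (List Int))) (operator : List String) : Prop :=
  pvOk operator 0 expression.toList = true ∧
  1 ≤ pvCnt operator 0 expression.toList ∧
  (expression.toList.all (fun c =>
      decide (String.mk [c] ∈ operator) ||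
      (matrices.find? (fun p => p.1 == String.mk [c])).isSome)) = true ∧
  (matrices.map Prod.fst).Nodup ∧
  pvShapes matrices operator expression.toList [] = true

instance (expression : String) (matrices : List (String × List (List Int))) (operator : List String) : Decidable (Pre_compute_expression expression matrices operator) := by unfold Pre_compute_expression; infer_instance

def pvWitness_compute_expression : String × (List (String × List (List Int))) × List String :=
  ("ab+", [("a", [[1]]), ("b", [[2]])], ["+"])

def Spec_compute_expression (expression : String) (matrices : List (String × List (List Int))) (operator : List String) (out : List (List Int)) : Prop := out = compute_expression_alt expression matrices operator
instance (expression : String) (matrices : List (String × List (List Int))) (operator : List String) (out : List (List Int)) : Decidable (Spec_compute_expression expression matrices operator out) := by unfold Spec_compute_expression; infer_instance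

-- ===== CLAIM (what is proved, stated in full; the proofs are below) =====
def Claim_equal_compute_expression : Prop := ∀ (expression : String) (matrices : List (String × List (List Int))) (operator : List String), Dom_compute_expression expression matrices operator → Pre_compute_expression expression matrices operator → Spec_compute_expression expression matrices operator (compute_expression expression matrices operator)

-- ===== LEMMAS AND PROOFS =====

-- a token segment that is a complete postfix subexpression with value v
inductive pvEv (matrices : List (String × List (List Int))) (operator : List String) :
    List Char → List (List Int) → Prop
  | leaf (c : Char) (h : ¬ (String.mk [c] ∈ operator)) :
      pvEv matrices operator [c] (pvLookA matrices (String.mk [c]))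
  | node (c : Char) (sl sr : List Char) (l r : List (List Int))
      (hop : String.mk [c] ∈ operator) (hc : c = '+' ∨ c = '*')
      (hl : pvEv matrices operator sl l) (hr : pvEv matrices operator sr r) :
      pvEv matrices operator (sl ++ sr ++ [c]) (pvApplyA c l r)

lemma pvEv_len_pos {matrices operator s v} (h : pvEv matrices operator s v) : 1 ≤ s.length := by
  cases h
  · simp
  · simp
    omega

-- A's stack is exactly the values of the complete subtrees of the prefix read so far
inductive pvStk (matrices : List (String × List (List Int))) (operator : List String) :
    List Char → List (List (List Int)) → Prop
  | nil : pvStk matrices operator [] []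
  | push (ts : List Char) (vs : List (List (List Int))) (s : List Char) (v : List (List Int))
      (h : pvStk matrices operator ts vs) (he : pvEv matrices operator s v) :
      pvStk matrices operator (ts ++ s) (v :: vs)

lemma pvStk_cons {matrices operator ts v vs} (h : pvStk matrices operator ts (v :: vs)) :
    ∃ ts1 s, ts = ts1 ++ s ∧ pvStk matrices operator ts1 vs ∧ pvEv matrices operator s v := by
  cases h with
  | push ts1 vs1 s1 v1 h he => exact ⟨ts1, s1, rfl, h, he⟩

lemma pvEvalB_of_Ev {matrices operator s v} (h : pvEv matrices operator s v) :
    ∀ (r : List Char) (f : Nat), s.length ≤ f →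
      pvEvalB matrices operator f (s.reverse ++ r) = some (v, r) := by
  induction h with
  | leaf c hc =>
    intro r f hf
    obtain ⟨f', rfl⟩ : ∃ f', f = f' + 1 := ⟨f - 1, by simp at hf; omega⟩
    simp [pvEvalB, if_neg hc]
  | node c sl sr l rv hop hc hl hr ihl ihr =>
    intro r f hf
    have hlen : sl.length + sr.length + 1 ≤ f := by simpa using hf
    obtain ⟨f', rfl⟩ : ∃ f', f = f' + 1 := ⟨f - 1, by omega⟩
    have hsl : 1 ≤ sl.length := pvEv_len_pos hl
    have hsr : 1 ≤ sr.length := pvEv_len_pos hr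
    have hrev : (sl ++ sr ++ [c]).reverse ++ r = c :: (sr.reverse ++ (sl.reverse ++ r)) := by
      simp
    rw [hrev]
    simp only [pvEvalB, if_pos hop]
    rw [ihr (sl.reverse ++ r) f' (by omega)]
    dsimp only
    rw [ihl r f' (by omega)]
    dsimp only
    rcases hc with hc | hc <;> subst hc
    · simp [pvApplyA]
    · simp [pvApplyA]

lemma pvRun {matrices operator} :
    ∀ (ts pre : List Char) (vs : List (List (List Int))),
      pvStk matrices operator pre vs → pvOk operator vs.length ts = true →
      pvStk matrices operator (pre ++ ts) (ts.foldl (pvStepA matrices operator) vs) ∧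
      (ts.foldl (pvStepA matrices operator) vs).length = pvCnt operator vs.length ts := by
  intro ts
  induction ts with
  | nil => intro pre vs hstk _; simpa [pvCnt] using hstk
  | cons c ts ih =>
    intro pre vs hstk hok
    by_cases hop : String.mk [c] ∈ operator
    · rw [pvOk, if_pos hop] at hok
      simp only [Bool.and_eq_true, decide_eq_true_eq] at hok
      obtain ⟨⟨hc, hk⟩, hok⟩ := hok
      match vs, hk with
      | b :: a :: vs'', _ =>
        obtain ⟨ts1, sb, hp1, h1, heb⟩ := pvStk_cons hstk
        obtain ⟨ts2, sa, hp2, h2, hea⟩ := pvStk_cons h1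
        subst hp2
        subst hp1
        have hstk' : pvStk matrices operator (((ts2 ++ sa) ++ sb) ++ [c])
            (pvApplyA c a b :: vs'') := by
          have := pvStk.push ts2 vs'' (sa ++ sb ++ [c]) (pvApplyA c a b) h2
            (pvEv.node c sa sb a b hop hc hea heb)
          simpa [List.append_assoc] using this
        have hstep : pvStepA matrices operator (b :: a :: vs'') c = pvApplyA c a b :: vs'' := by
          simp [pvStepA, if_pos hop]
        have hok' : pvOk operator (pvApplyA c a b :: vs'').length ts = true := by
          have hl : (pvApplyA c a b :: vs'').length = (b :: a :: vs'').length - 1 := by simp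
          rw [hl]; exact hok
        have hih := ih (((ts2 ++ sa) ++ sb) ++ [c]) (pvApplyA c a b :: vs'') hstk' hok'
        constructor
        · have h := hih.1
          simpa [List.foldl_cons, hstep, List.append_assoc] using h
        · have h := hih.2
          rw [List.foldl_cons, hstep, h]
          simp [pvCnt, hop]
    · rw [pvOk, if_neg hop] at hok
      have hstk' : pvStk matrices operator (pre ++ [c])
          (pvLookA matrices (String.mk [c]) :: vs) := by
        have := pvStk.push pre vs [c] (pvLookA matrices (String.mk [c])) hstk
          (pvEv.leaf c hop)
        simpa using this
      have hstep : pvStepA matrices operator vs c = pvLookA matrices (String.mk [c]) :: vs := by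
        simp [pvStepA, if_neg hop]
      have hok' : pvOk operator (pvLookA matrices (String.mk [c]) :: vs).length ts = true := by
        simpa using hok
      have := ih (pre ++ [c]) (pvLookA matrices (String.mk [c]) :: vs) hstk' hok'
      constructor
      · have h := this.1
        simpa [List.foldl_cons, hstep, List.append_assoc] using h
      · have h := this.2
        rw [List.foldl_cons, hstep, h]
        simp [pvCnt, hop]

-- ===== VERDICT (by name: the statement is the Claim_ definition above) =====
theorem compute_expression_spec : Claim_equal_compute_expression := by
  intro expression matrices operator _ hpre
  obtain ⟨hok, hcnt, -, -⟩ := hpre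
  unfold Spec_compute_expression
  have hrun := pvRun (matrices := matrices) (operator := operator) expression.toList [] []
    pvStk.nil (by simpa using hok)
  set vs' := expression.toList.foldl (pvStepA matrices operator) [] with hvs'
  have hlen : 1 ≤ vs'.length := by rw [hrun.2]; simpa using hcnt
  match vs', hlen, hrun with
  | v :: rest, _, hrun =>
    have hstk := hrun.1
    simp only [List.nil_append] at hstk
    obtain ⟨ts1, s, hsplit, h1, hev⟩ := pvStk_cons hstk
    have hA : compute_expression expression matrices operator = v := by
      unfold compute_expression
      rw [← hvs']
      rfl
    have hrev : expression.toList.reverse = s.reverse ++ ts1.reverse := by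
      rw [hsplit]
      simp
    have hflen : s.length ≤ expression.toList.length := by
      rw [hsplit]
      simp
    have hB : compute_expression_alt expression matrices operator = v := by
      unfold compute_expression_alt
      rw [hrev, pvEvalB_of_Ev hev ts1.reverse expression.toList.length hflen]
    rw [hA, hB]
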